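-- pv_equiv track=rewrite | github.com/msagi/advent-of-code-2020 | 10/solution2.py | gap_split
-- ===== SOURCE A (Python) =====
-- def gap_split(chain: [int], gap: int):
--     """
--     Split input chain where the distance in between items is at least 3
--     :param chain: Input chain to split
--     :param gap: The minimum gap required to split the input chain
--     :return: List of sub-chains; the split item is duplicated and appears as
--         last and first item of the mapped sub-chains; sub-chains with 1 or 2 items are skipped
--     """
--     chain_blocks = []
--     chain_block = [0]  # aircraft's charging outlet joltage
--     item = 0
--     for i in range(len(chain)):
--         if not chain_block or chain[i] < item + gap:
--             item = chain[i]
--             chain_block.append(item)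
--             continue
--         item = chain[i]
--         chain_block.append(item)
--         if len(chain_block) > 2:  # blocks with 1 or 2 items can only have 1 distinct arrangement
--             chain_blocks.append(chain_block)
--         chain_block = [item]
--     if len(chain_block) > 2:  # blocks with 1 or 2 items can only have 1 distinct arrangement
--         chain_blocks.append(chain_block)
--     return chain_blocks
-- ===== SOURCE B (Python) =====
-- def gap_split(chain, gap):
--     """Boundary-index + slicing reimplementation: compute split positions in one
--     pass over adjacent pairs, then cut the (0-prefixed) chain into inclusive
--     slices between consecutive boundaries, keeping only slices longer than 2."""
--     full = [0] + list(chain)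
--     n = len(full)
--     bounds = [0] + [i for i in range(1, n) if full[i] - full[i - 1] >= gap] + [n - 1]
--     return [blk for b, e in zip(bounds, bounds[1:])
--             for blk in [full[b:e + 1]] if len(blk) > 2]
-- ===== Notes on version B (the rewrite author's own statement) =====
-- stated objective: alternative
-- what changed: Replaces the accumulate-and-reset loop carrying (blocks, current block, previous item) state by a boundary-index pass: compute the list of split indices over the 0-prefixed chain, then cut it into inclusive slices between consecutive boundaries and filter out slices of length <= 2.
import Mathlib
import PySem

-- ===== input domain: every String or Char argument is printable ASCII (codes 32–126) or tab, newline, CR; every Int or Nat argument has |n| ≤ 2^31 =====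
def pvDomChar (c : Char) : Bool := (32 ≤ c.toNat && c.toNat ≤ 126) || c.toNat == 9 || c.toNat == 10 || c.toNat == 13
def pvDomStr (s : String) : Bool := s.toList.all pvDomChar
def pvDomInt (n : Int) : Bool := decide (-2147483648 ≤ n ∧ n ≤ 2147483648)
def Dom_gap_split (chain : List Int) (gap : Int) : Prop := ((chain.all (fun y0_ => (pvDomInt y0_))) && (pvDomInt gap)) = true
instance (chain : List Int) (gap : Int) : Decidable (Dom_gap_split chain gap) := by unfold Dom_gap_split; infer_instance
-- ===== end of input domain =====

-- B replaces A's accumulate-and-reset loop by a split-index pass plus inclusive slicing (alternative decomposition, same cost).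

-- ===== PORT A =====
-- loop body of A's for-loop, carried as state (chain_blocks, chain_block, item)
def gapSplitStep (gap : Int) (st : List (List Int) × List Int × Int) (c : Int) :
    List (List Int) × List Int × Int :=
  if st.2.1 = [] ∨ c < st.2.2 + gap then
    (st.1, st.2.1 ++ [c], c)
  else
    let block' := st.2.1 ++ [c]
    if 2 < block'.length then (st.1 ++ [block'], [c], c)
    else (st.1, [c], c)

def gap_split (chain : List Int) (gap : Int) : List (List Int) :=
  let r := chain.foldl (gapSplitStep gap) ([], [0], 0)
  if 2 < r.2.1.length then r.1 ++ [r.2.1] else r.1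

-- ===== PORT B =====
def gap_split_alt (chain : List Int) (gap : Int) : List (List Int) :=
  let full : List Int := 0 :: chain
  let n : Int := (full.length : Int)
  let bounds : List Int :=
    0 :: ((PySem.List.pyRange 1 n 1).filter (fun i =>
        gap ≤ PySem.List.pyGetD full i 0 - PySem.List.pyGetD full (i - 1) 0)) ++ [n - 1]
  (bounds.zip bounds.tail).flatMap (fun be =>
    let blk := PySem.List.slice full (some be.1) (some (be.2 + 1))
    if 2 < blk.length then [blk] else [])

-- ===== PRECONDITION & SPEC =====
def Spec_gap_split (chain : List Int) (gap : Int) (out : List (List Int)) : Prop := out = gap_split_alt chain gap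
instance (chain : List Int) (gap : Int) (out : List (List Int)) : Decidable (Spec_gap_split chain gap out) := by unfold Spec_gap_split; infer_instance

-- ===== CLAIM (what is proved, stated in full; the proofs are below) =====
def Claim_equal_gap_split : Prop := ∀ (chain : List Int) (gap : Int), Dom_gap_split chain gap → Spec_gap_split chain gap (gap_split chain gap)

-- ===== LEMMAS AND PROOFS =====

-- common reference: the list of maximal blocks (unfiltered), A-style accumulator recursion
def blocksRec (gap : Int) (cur : List Int) (prev : Int) : List Int → List (List Int)
  | [] => [cur]
  | c :: t => if c < prev + gap then blocksRec gap (cur ++ [c]) c t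
              else (cur ++ [c]) :: blocksRec gap [c] c t

-- the same blocks, cons-style recursion over the full list
def blocksF (gap : Int) : List Int → List (List Int)
  | [] => []
  | [x] => [[x]]
  | x :: y :: t =>
    if gap ≤ y - x then [x, y] :: blocksF gap (y :: t)
    else
      match blocksF gap (y :: t) with
      | [] => []
      | b :: bs => (x :: b) :: bs

def sliceBlocks (full : List Int) (bnds : List Int) : List (List Int) :=
  (bnds.zip bnds.tail).map (fun be => PySem.List.slice full (some be.1) (some (be.2 + 1)))

def boundsFrom (gap : Int) (full : List Int) (s : Int) : List Int :=
  s :: ((PySem.List.pyRange (s + 1) (full.length : Int) 1).filter (fun i =>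
      gap ≤ PySem.List.pyGetD full i 0 - PySem.List.pyGetD full (i - 1) 0)) ++ [(full.length : Int) - 1]

theorem blocksRec_ne_nil (gap : Int) (cur : List Int) (prev : Int) (rest : List Int) :
    blocksRec gap cur prev rest ≠ [] := by
  induction rest generalizing cur prev with
  | nil => simp [blocksRec]
  | cons c t ih =>
    simp only [blocksRec]
    split_ifs with h
    · exact ih _ _
    · simp

theorem blocksRec_append (gap : Int) (a cur : List Int) (prev : Int) (rest : List Int) :
    blocksRec gap (a ++ cur) prev rest = (blocksRec gap cur prev rest).modifyHead (a ++ ·) := by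
  induction rest generalizing cur prev with
  | nil => simp [blocksRec]
  | cons c t ih =>
    simp only [blocksRec]
    split_ifs with h
    · rw [List.append_assoc]; exact ih _ _
    · simp [List.append_assoc]

theorem blocksF_eq_blocksRec (gap : Int) (x : Int) (rest : List Int) :
    blocksF gap (x :: rest) = blocksRec gap [x] x rest := by
  induction rest generalizing x with
  | nil => simp [blocksF, blocksRec]
  | cons y t ih =>
    simp only [blocksF, blocksRec]
    by_cases h : gap ≤ y - x
    · rw [if_pos h, if_neg (by omega), ih y]; rfl
    · rw [if_neg h, if_pos (by omega), ih y]
      simp only [List.cons_append, List.nil_append] at *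
      have h2 : blocksRec gap [x, y] y t = (blocksRec gap [y] y t).modifyHead ([x] ++ ·) :=
        blocksRec_append gap [x] [y] y t
      rw [h2]
      rcases hb : blocksRec gap [y] y t with _ | ⟨b, bs⟩
      · exact absurd hb (blocksRec_ne_nil gap [y] y t)
      · simp

theorem foldA_eq (gap : Int) (rest : List Int) :
    ∀ (bl : List (List Int)) (cur : List Int) (prev : Int), cur ≠ [] →
    (let r := rest.foldl (gapSplitStep gap) (bl, cur, prev)
     if 2 < r.2.1.length then r.1 ++ [r.2.1] else r.1)
      = bl ++ (blocksRec gap cur prev rest).filter (fun b => decide (2 < b.length)) := by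
  induction rest with
  | nil =>
    intro bl cur prev hc
    simp only [List.foldl_nil, blocksRec, List.filter_cons, List.filter_nil]
    by_cases h : 2 < cur.length <;> simp [h]
  | cons c t ih =>
    intro bl cur prev hc
    simp only [List.foldl_cons, blocksRec]
    by_cases h : c < prev + gap
    · rw [show gapSplitStep gap (bl, cur, prev) c = (bl, cur ++ [c], c) by
        simp [gapSplitStep, hc, h]]
      rw [if_pos h]
      exact ih bl (cur ++ [c]) c (by simp)
    · rw [if_neg h, List.filter_cons]
      have hl : (cur ++ [c]).length = cur.length + 1 := by simp
      by_cases h2 : 2 < (cur ++ [c]).length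
      · rw [show gapSplitStep gap (bl, cur, prev) c = (bl ++ [cur ++ [c]], [c], c) by
          simp [gapSplitStep, hc, h]
          omega]
        rw [ih (bl ++ [cur ++ [c]]) [c] c (by simp)]
        simp [List.append_assoc]
        omega
      · rw [show gapSplitStep gap (bl, cur, prev) c = (bl, [c], c) by
          simp [gapSplitStep, hc, h]
          omega]
        rw [ih bl [c] c (by simp)]
        simp
        omega

theorem sliceBlocks_cons2 (full : List Int) (a b : Int) (l : List Int) :
    sliceBlocks full (a :: b :: l) =
      PySem.List.slice full (some a) (some (b + 1)) :: sliceBlocks full (b :: l) := rfl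

theorem slice_cons_step (xs : List Int) (s : Nat) (b : Int) (hs : s < xs.length)
    (hb : (s : Int) < b) :
    PySem.List.slice xs (some (s : Int)) (some b) =
      xs[s] :: PySem.List.slice xs (some ((s : Int) + 1)) (some b) := by
  rw [PySem.List.slice_toNat xs (by omega) (by omega),
      PySem.List.slice_toNat xs (by omega) (by omega)]
  rw [show ((s : Int) + 1).toNat = s + 1 by omega, show ((s : Int)).toNat = s by omega]
  rw [List.drop_eq_getElem_cons hs]
  rw [show b.toNat - s = (b.toNat - (s + 1)) + 1 by omega, List.take_succ_cons]

theorem slice_stop (xs : List Int) (b : Int) (hb : 0 ≤ b) :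
    PySem.List.slice xs (some b) (some b) = [] := by
  rw [PySem.List.slice_toNat xs hb hb]
  simp

theorem sliceBlocks_boundsFrom (gap : Int) (full : List Int) :
    ∀ (k s : Nat), s + (k + 1) = full.length →
    sliceBlocks full (boundsFrom gap full (s : Int)) = blocksF gap (full.drop s) := by
  intro k
  induction k with
  | zero =>
    intro s hs
    have hs0 : s < full.length := by omega
    have hnil : PySem.List.pyRange ((s : Int) + 1) (full.length : Int) = [] :=
      PySem.List.pyRange_one_eq_nil (by omega)
    have hdropped : full.drop (s + 1) = [] := List.drop_eq_nil_of_le (by omega)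
    have hd : full.drop s = [full[s]] := by
      rw [List.drop_eq_getElem_cons hs0, hdropped]
    have hb1 : ((full.length : Int) - 1) = (s : Int) := by omega
    rw [boundsFrom, hnil, hb1, List.filter_nil, hd]
    simp only [List.singleton_append]
    rw [sliceBlocks_cons2, slice_cons_step full s ((s : Int) + 1) hs0 (by omega),
        slice_stop full ((s : Int) + 1) (by omega)]
    simp [sliceBlocks, blocksF]
  | succ k ih =>
    intro s hs
    have hs0 : s < full.length := by omega
    have hs1 : s + 1 < full.length := by omega
    have hcons : PySem.List.pyRange ((s : Int) + 1) (full.length : Int) =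
        ((s : Int) + 1) :: PySem.List.pyRange ((s : Int) + 1 + 1) (full.length : Int) :=
      PySem.List.pyRange_one_cons (by omega)
    have c1 : ((s + 1 : Nat) : Int) = (s : Int) + 1 := by push_cast; ring
    have hP : PySem.List.pyGetD full ((s : Int) + 1) 0 - PySem.List.pyGetD full ((s : Int) + 1 - 1) 0
        = full[s + 1] - full[s] := by
      rw [show ((s : Int) + 1 - 1) = (s : Int) by ring, ← c1,
          PySem.List.pyGetD_natCast, PySem.List.pyGetD_natCast,
          List.getD_eq_getElem full 0 hs1, List.getD_eq_getElem full 0 hs0]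
    have hdropS : full.drop s = full[s] :: full.drop (s + 1) := List.drop_eq_getElem_cons hs0
    have hdropS1 : full.drop (s + 1) = full[s + 1] :: full.drop (s + 2) :=
      List.drop_eq_getElem_cons hs1
    have hIH := ih (s + 1) (by omega)
    rw [boundsFrom, c1] at hIH
    simp only [List.cons_append] at hIH
    have hsl : PySem.List.slice full (some (s : Int)) (some ((s : Int) + 1 + 1))
        = [full[s], full[s + 1]] := by
      rw [slice_cons_step full s ((s : Int) + 1 + 1) hs0 (by omega)]
      rw [show ((s : Int) + 1) = ((s + 1 : Nat) : Int) from c1.symm]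
      rw [slice_cons_step full (s + 1) (((s + 1 : Nat) : Int) + 1) hs1 (by omega)]
      rw [show (((s + 1 : Nat) : Int) + 1) = ((s + 2 : Nat) : Int) by push_cast; ring]
      rw [slice_stop full ((s + 2 : Nat) : Int) (by omega)]
    rw [boundsFrom, hcons, List.filter_cons, hP]
    by_cases hsp : gap ≤ full[s + 1] - full[s]
    · rw [if_pos (by exact decide_eq_true hsp)]
      simp only [List.cons_append]
      rw [sliceBlocks_cons2, hsl, hIH, hdropS, hdropS1]
      simp only [blocksF]
      rw [if_pos hsp, ← hdropS1]
    · rw [if_neg (by simp [hsp])]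
      simp only [List.cons_append]
      rcases hrest : (PySem.List.pyRange ((s : Int) + 1 + 1) (full.length : Int)).filter
          (fun i => decide (gap ≤ PySem.List.pyGetD full i 0 - PySem.List.pyGetD full (i - 1) 0))
          ++ [(full.length : Int) - 1] with _ | ⟨e, l⟩
      · exact absurd hrest (by simp)
      · have he : (s : Int) < e := by
          have hmem : e ∈ (PySem.List.pyRange ((s : Int) + 1 + 1) (full.length : Int)).filter
              (fun i => decide (gap ≤ PySem.List.pyGetD full i 0 - PySem.List.pyGetD full (i - 1) 0))
              ++ [(full.length : Int) - 1] := by rw [hrest]; exact List.mem_cons_self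
          rcases List.mem_append.1 hmem with hm | hm
          · have := PySem.List.mem_pyRange_one.1 (List.mem_filter.1 hm).1
            omega
          · have : e = (full.length : Int) - 1 := by simpa using hm
            omega
        rw [hrest] at hIH
        rw [sliceBlocks_cons2] at hIH
        rw [sliceBlocks_cons2, slice_cons_step full s (e + 1) hs0 (by omega)]
        rw [hdropS, hdropS1]
        simp only [blocksF]
        rw [if_neg hsp, ← hdropS1, ← hIH]

-- A's flatMap with a singleton-or-empty body is filter-after-map
theorem flatMap_slice_filter (full : List Int) (l : List (Int × Int)) :
    l.flatMap (fun be =>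
        let blk := PySem.List.slice full (some be.1) (some (be.2 + 1))
        if 2 < blk.length then [blk] else [])
      = (l.map (fun be => PySem.List.slice full (some be.1) (some (be.2 + 1)))).filter
          (fun b => decide (2 < b.length)) := by
  induction l with
  | nil => rfl
  | cons p t ih =>
    simp only [List.flatMap_cons, List.map_cons, List.filter_cons, ih]
    by_cases h : 2 < (PySem.List.slice full (some p.1) (some (p.2 + 1))).length
    · simp [h]
    · simp [h]

-- ===== VERDICT (by name: the statement is the Claim_ definition above) =====
theorem gap_split_spec : Claim_equal_gap_split := by
  intro chain gap _
  unfold Spec_gap_split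
  have hA : gap_split chain gap
      = (blocksRec gap [0] 0 chain).filter (fun b => decide (2 < b.length)) := by
    have := foldA_eq gap chain [] [0] 0 (by simp)
    simpa [gap_split] using this
  have hB : gap_split_alt chain gap
      = (sliceBlocks (0 :: chain) (boundsFrom gap (0 :: chain) ((0 : Nat) : Int))).filter
          (fun b => decide (2 < b.length)) := by
    rw [gap_split_alt, flatMap_slice_filter, sliceBlocks, boundsFrom]
    norm_num
  rw [hA, hB, sliceBlocks_boundsFrom gap (0 :: chain) chain.length 0 (by simp)]
  rw [List.drop_zero, blocksF_eq_blocksRec]
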